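/-
  THE PROGRAM RECORD OF THE CONTRACT LAYER: what a linked image fixes for EVERY contract of a program.

      Text                    the text window `[lo, hi)` of the image (the code of the program: never written during the run) and the
                              address of `__asan_report` (where a failed check goes)
      Text.HiIs T n           `T.hi` is the numeral `n`: declared once per program, read by `LiveIn.where_`

  Every definition of ProgX/Spec/Basic.lean (`WayInv`, `CodeOK`, `conv`, `ShadowPre`) and every contract of the runtime, libc and
  libm (ProgX/Spec/*.lean) takes a `Text` as its first argument. A program has ONE `Text` (a closed term: its fields evaluate):

      ProgX.Base.T            the platform of the BASE IMAGE (ProgX/Base/Text.lean): `[100000H, 140000H)`, `__asan_report` where the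
                              base puts it. Every program linked against the base image has THIS `Text`, so the contracts and the
                              proofs of the base's functions are closed terms, proved once, imported by every program.
      Vorbis.text             stb_vorbis was linked before the base image existed: `[100000H, 119D40H)`, report at 100059H.

  The rest of a program's addresses (entry, exit, `__image_end`, the file's bytes) is the `Image` of ProgX/Start.lean; the memory map
  (data space [100000H, C00000H), stack [700000H, 800000H), shadow [C00000H, E00000H), 16 MB of RAM) is fixed by Asan/*.lean and by
  the constants compiled into c/base/asan_rt.c: it is the same for every program.
-/
import X86.Derived.User.State
namespace ProgX
open X86

/-- **The text window of an image and its report address.** The two proof fields make every use of the window free of side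
conditions (`lo + (hi - lo) < 2 ^ 64` for `Code.ofMem`; the text lies below the stack region; every code address is below 1 GB: what executing `ret` asks). For a closed
`Text` they are `by decide`. -/
structure Text where
  /-- `__text_start`: the first byte of code -/
  lo : Nat
  /-- the end of the text window: no live object lies below it, no instruction is fetched at or above it -/
  hi : Nat
  /-- `__asan_report`: where a failed check goes -/
  report : Word
  /-- the window is not empty the wrong way round -/
  lo_le : lo ≤ hi
  /-- the window lies inside the image area, which ends at 1F0000H (link script; `Image.OK.end_le`): below the parameter block,
  the input, the stack, and far below 1 GB (the flat machine's canonical addresses) -/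
  hi_le : hi ≤ 0x1F0000

/-- **The end of the text window as a NUMERAL.** A program declares it once, next to its text record
(`instance : Vorbis.text.HiIs 0x119d40 := ⟨rfl⟩`); `LiveIn.where_` (ProgX/Spec/Basic.lean) then states "off the text" with the
number, which `omega` and `u_omega` read (they do not unfold `T.hi`). For a record that declares none (the variable `T` of a
generic lemma) the fallback `Text.hiIs_self` gives `T.hi` itself. -/
class Text.HiIs (T : Text) (hi : outParam Nat) : Prop where
  /-- the numeral is the end of the window -/
  eq : T.hi = hi

/-- The fallback: a text record without a declared numeral has the end `T.hi`. -/
instance (priority := low) Text.hiIs_self (T : Text) : T.HiIs T.hi :=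
  ⟨rfl⟩

end ProgX
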